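-- pv_equiv track=rewrite | github.com/Kacp11223/pp1 | 04-Subroutines/36.py | f
-- ===== SOURCE A (Python) =====
-- def f(s):
--     count = 0
--     for x in s:
--         if x == '+':
--             count += 1
--             if count == 3:
--                 return True
--         else:
--             count -= 1
--     return False
-- ===== SOURCE B (Python) =====
-- def f(s):
--     total = 0
--     sums = [0]
--     for c in s:
--         total += 1 if c == '+' else -1
--         sums.append(total)
--     return max(sums) >= 3
-- ===== Notes on version B (the rewrite author's own statement) =====
-- stated objective: alternative
-- what changed: B replaces the early-exit counter that tests count==3 with materialising the whole prefix-sum sequence and testing max(sums) >= 3 (correct because unit steps make 'ever >= 3' equivalent to 'hits exactly 3').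
import Mathlib
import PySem

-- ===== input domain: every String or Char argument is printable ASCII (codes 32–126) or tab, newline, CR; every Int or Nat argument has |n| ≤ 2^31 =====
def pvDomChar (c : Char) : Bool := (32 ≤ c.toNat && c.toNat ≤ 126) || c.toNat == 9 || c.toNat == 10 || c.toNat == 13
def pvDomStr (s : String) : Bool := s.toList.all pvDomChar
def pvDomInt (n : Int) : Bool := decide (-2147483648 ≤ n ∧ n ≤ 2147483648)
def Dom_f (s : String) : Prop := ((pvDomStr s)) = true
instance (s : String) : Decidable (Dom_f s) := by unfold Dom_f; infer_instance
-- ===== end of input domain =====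

-- B replaces A's early-exit counter (test count == 3) by materialising the prefix-sum list and testing max >= 3; alternative decomposition, same result.

-- ===== PORT A =====
def fA : List Char → Int → Bool
  | [], _ => false
  | x :: rest, count =>
    if x = '+' then
      if count + 1 = 3 then true else fA rest (count + 1)
    else fA rest (count - 1)

def f (s : String) : Bool := fA s.toList 0

-- ===== PORT B =====
def f_alt (s : String) : Bool :=
  match PySem.List.max?
      (s.toList.foldl
        (fun (p : Int × List Int) c =>
          let t := p.1 + (if c = '+' then 1 else -1)
          (t, p.2 ++ [t]))
        ((0 : Int), ([0] : List Int))).2 (fun x => x) with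
  | some m => decide (3 ≤ m)
  | none => false  -- unreachable: sums starts as [0]

-- ===== PRECONDITION & SPEC =====
def Spec_f (s : String) (out : Bool) : Prop := out = f_alt s
instance (s : String) (out : Bool) : Decidable (Spec_f s out) := by unfold Spec_f; infer_instance

-- ===== CLAIM (what is proved, stated in full; the proofs are below) =====
def Claim_equal_f : Prop := ∀ (s : String), Dom_f s → Spec_f s (f s)

-- ===== LEMMAS AND PROOFS =====

/-- The prefix sums (after each step) of the ±1 walk starting at `t`. -/
def psums (t : Int) : List Char → List Int
  | [] => []
  | c :: r =>
    let t' := t + (if c = '+' then 1 else -1)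
    t' :: psums t' r

theorem foldl_snd (l : List Char) : ∀ (t : Int) (S : List Int),
    (l.foldl (fun (p : Int × List Int) c =>
        let t := p.1 + (if c = '+' then 1 else -1)
        (t, p.2 ++ [t])) (t, S)).2 = S ++ psums t l := by
  induction l with
  | nil => intro t S; simp [psums]
  | cons c r ih =>
    intro t S
    simp only [List.foldl_cons, psums]
    rw [ih]
    simp

theorem fA_iff (l : List Char) : ∀ (t : Int), t ≤ 2 →
    (fA l t = true ↔ ∃ x ∈ psums t l, 3 ≤ x) := by
  induction l with
  | nil => intro t _; simp [fA, psums]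
  | cons c r ih =>
    intro t ht
    have key : ∀ t' : Int, t' ≤ 2 →
        (fA r t' = true ↔ ∃ x ∈ t' :: psums t' r, 3 ≤ x) := by
      intro t' ht'
      rw [ih t' ht']
      simp only [List.mem_cons]
      constructor
      · rintro ⟨x, hx, h⟩; exact ⟨x, Or.inr hx, h⟩
      · rintro ⟨x, hx, h⟩
        cases hx with
        | inl he => omega
        | inr hm => exact ⟨x, hm, h⟩
    by_cases hc : c = '+'
    · have hp : psums t (c :: r) = (t + 1) :: psums (t + 1) r := by simp [psums, hc]
      have hf : fA (c :: r) t = if t + 1 = 3 then true else fA r (t + 1) := by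
        simp [fA, hc]
      rw [hp, hf]
      by_cases h3 : t + 1 = 3
      · simp only [if_pos h3]
        constructor
        · intro _; exact ⟨t + 1, List.mem_cons_self, by omega⟩
        · intro _; trivial
      · rw [if_neg h3]
        exact key (t + 1) (by omega)
    · have hp : psums t (c :: r) = (t + -1) :: psums (t + -1) r := by simp [psums, hc]
      have hf : fA (c :: r) t = fA r (t - 1) := by simp [fA, hc]
      have hd : t - 1 = t + -1 := by omega
      rw [hd] at hf
      rw [hp, hf]
      exact key (t + -1) (by omega)

theorem max_ge_iff (P : List Int) : (3 ≤ P.foldl max 0) ↔ ∃ x ∈ P, 3 ≤ x := by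
  constructor
  · intro h
    rcases PySem.List.foldl_max_mem P 0 with h0 | hm
    · omega
    · exact ⟨P.foldl max 0, hm, h⟩
  · rintro ⟨x, hx, h3⟩
    have := (PySem.List.le_foldl_max P 0).2 x hx
    omega

-- ===== VERDICT (by name: the statement is the Claim_ definition above) =====
theorem f_spec : Claim_equal_f := by
  intro s _
  unfold Spec_f f f_alt
  rw [foldl_snd]
  rw [List.singleton_append, PySem.List.max?_id_cons]
  have hA := fA_iff s.toList 0 (by norm_num)
  have hM := max_ge_iff (psums 0 s.toList)
  cases hfa : fA s.toList 0 with
  | true =>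
    have := hA.mp hfa
    simp [hM.mpr this]
  | false =>
    have : ¬ ∃ x ∈ psums 0 s.toList, 3 ≤ x := by
      intro h; rw [← hA] at h; simp [hfa] at h
    simp [hM, this]
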